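-- pv_equiv track=rewrite | github.com/nerdwang/VGE-pytorch | VGE-pytorch/vge.py | get_channels_ls
-- ===== SOURCE A (Python) =====
-- def get_channels_ls(in_channels, growth_channels, num_layers):
--     in_channels_ls = []
--     hidden_channels_ls = []
--     for _ in range(num_layers):
--         in_channels_ls.append(in_channels)
--
--         hidden_channels = min(in_channels, 4 * growth_channels)
--         hidden_channels_ls.append(hidden_channels)
--
--         in_channels += growth_channels
--     return in_channels_ls, hidden_channels_ls
-- ===== SOURCE B (Python) =====
-- def get_channels_ls(in_channels, growth_channels, num_layers):
--     # Build the channel sequence BACK-TO-FRONT: start from the last layer's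
--     # input count and step downwards, then reverse; the hidden list is a
--     # separate pass derived from the finished first list.
--     rev = []
--     c = in_channels + (num_layers - 1) * growth_channels
--     for _ in range(num_layers):
--         rev.append(c)
--         c -= growth_channels
--     in_channels_ls = rev[::-1]
--     cap = 4 * growth_channels
--     hidden_channels_ls = [min(c, cap) for c in in_channels_ls]
--     return in_channels_ls, hidden_channels_ls
-- ===== Notes on version B (the rewrite author's own statement) =====
-- stated objective: alternative
-- what changed: B builds the input-channel sequence back-to-front (starting from the last layer's value and stepping downwards, then reversing), and derives the hidden list in a separate second pass over the finished first list, instead of A's single forward fused accumulation loop.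
import Mathlib
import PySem

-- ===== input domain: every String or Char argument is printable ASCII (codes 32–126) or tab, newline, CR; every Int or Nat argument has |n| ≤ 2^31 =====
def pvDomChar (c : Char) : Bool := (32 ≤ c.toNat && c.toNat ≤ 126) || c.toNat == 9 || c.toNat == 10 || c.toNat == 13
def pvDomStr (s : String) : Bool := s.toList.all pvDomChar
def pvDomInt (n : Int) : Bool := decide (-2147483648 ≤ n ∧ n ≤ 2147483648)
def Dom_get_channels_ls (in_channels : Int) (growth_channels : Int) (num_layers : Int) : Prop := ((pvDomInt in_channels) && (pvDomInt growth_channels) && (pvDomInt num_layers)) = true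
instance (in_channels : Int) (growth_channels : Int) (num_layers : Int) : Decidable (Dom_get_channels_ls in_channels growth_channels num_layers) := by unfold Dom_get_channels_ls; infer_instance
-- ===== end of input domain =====

-- B builds the first list back-to-front (downward steps, then reverse) and derives the
-- hidden list in a separate second pass; objective: alternative decomposition, same cost.

-- ===== PORT A =====
-- A's loop: for _ in range(num_layers); state = (current in_channels, both lists, appended forward).
def getChannelsLoopA : Nat → Int → Int → List Int → List Int → List Int × List Int
  | 0, _, _, l1, l2 => (l1, l2)
  | k+1, cur, g, l1, l2 => getChannelsLoopA k (cur + g) g (l1 ++ [cur]) (l2 ++ [min cur (4 * g)])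

def get_channels_ls (in_channels : Int) (growth_channels : Int) (num_layers : Int) : List Int × List Int :=
  getChannelsLoopA num_layers.toNat in_channels growth_channels [] []

-- ===== PORT B =====
-- B's first loop: append c, c -= growth_channels, starting from the last layer's value.
def getChannelsLoopB : Nat → Int → Int → List Int → List Int
  | 0, _, _, rev => rev
  | k+1, c, g, rev => getChannelsLoopB k (c - g) g (rev ++ [c])

def get_channels_ls_alt (in_channels : Int) (growth_channels : Int) (num_layers : Int) : List Int × List Int :=
  let rev := getChannelsLoopB num_layers.toNat (in_channels + (num_layers - 1) * growth_channels) growth_channels []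
  let in_channels_ls := rev.reverse  -- rev[::-1]
  let cap := 4 * growth_channels
  let hidden_channels_ls := in_channels_ls.map (fun c => min c cap)
  (in_channels_ls, hidden_channels_ls)

-- ===== PRECONDITION & SPEC =====
def Spec_get_channels_ls (in_channels : Int) (growth_channels : Int) (num_layers : Int) (out : List Int × List Int) : Prop := out = get_channels_ls_alt in_channels growth_channels num_layers
instance (in_channels : Int) (growth_channels : Int) (num_layers : Int) (out : List Int × List Int) : Decidable (Spec_get_channels_ls in_channels growth_channels num_layers out) := by unfold Spec_get_channels_ls; infer_instance

-- ===== CLAIM (what is proved, stated in full; the proofs are below) =====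
def Claim_equal_get_channels_ls : Prop := ∀ (in_channels : Int) (growth_channels : Int) (num_layers : Int), Dom_get_channels_ls in_channels growth_channels num_layers → Spec_get_channels_ls in_channels growth_channels num_layers (get_channels_ls in_channels growth_channels num_layers)

-- ===== LEMMAS AND PROOFS =====

theorem getChannelsLoopA_eq (k : Nat) : ∀ (cur g : Int) (l1 l2 : List Int),
    getChannelsLoopA k cur g l1 l2 =
      (l1 ++ (List.range k).map (fun (i : Nat) => cur + (i : Int) * g),
       l2 ++ (List.range k).map (fun (i : Nat) => min (cur + (i : Int) * g) (4 * g))) := by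
  induction k with
  | zero => intro cur g l1 l2; simp [getChannelsLoopA]
  | succ k ih =>
    intro cur g l1 l2
    rw [getChannelsLoopA, ih, List.range_succ_eq_map]
    simp only [List.map_cons, List.map_map, List.append_assoc, List.cons_append,
      List.nil_append, Nat.cast_zero, zero_mul, add_zero]
    simp only [Prod.mk.injEq]
    constructor <;>
    · apply congrArg
      apply congrArg
      refine List.map_congr_left fun i _ => ?_
      simp only [Function.comp_apply]
      push_cast
      ring_nf

theorem getChannelsLoopB_eq (k : Nat) : ∀ (c g : Int) (acc : List Int),
    getChannelsLoopB k c g acc = acc ++ (List.range k).map (fun (i : Nat) => c - (i : Int) * g) := by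
  induction k with
  | zero => intro c g acc; simp [getChannelsLoopB]
  | succ k ih =>
    intro c g acc
    rw [getChannelsLoopB, ih, List.range_succ_eq_map]
    simp only [List.map_cons, List.map_map, List.append_assoc, List.cons_append,
      List.nil_append, Nat.cast_zero, zero_mul, sub_zero]
    apply congrArg
    apply congrArg
    refine List.map_congr_left fun i _ => ?_
    simp only [Function.comp_apply]
    push_cast
    ring

-- ===== VERDICT (by name: the statement is the Claim_ definition above) =====
theorem get_channels_ls_spec : Claim_equal_get_channels_ls := by
  intro x g n _
  unfold Spec_get_channels_ls get_channels_ls get_channels_ls_alt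
  rw [getChannelsLoopA_eq, getChannelsLoopB_eq]
  simp only [List.nil_append]
  have h1 : (List.range n.toNat).map (fun (i : Nat) => x + (i : Int) * g)
      = ((List.range n.toNat).map (fun (i : Nat) => x + (n - 1) * g - (i : Int) * g)).reverse := by
    apply List.ext_getElem
    · simp
    · intro i hi1 hi2
      simp only [List.length_map, List.length_reverse, List.length_range] at hi1 hi2
      simp only [List.getElem_reverse, List.getElem_map, List.getElem_range,
        List.length_map, List.length_range]
      have : ((n.toNat - 1 - i : Nat) : Int) = n - 1 - (i : Int) := by omega
      rw [this]
      ring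
  rw [← h1, List.map_map]
  simp [Function.comp]
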